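-- pv_equiv track=rewrite | github.com/friend0/dsa | dsa/leetcode/28.find-the-index-of-the-first-occurrence-in-a-string.py | strStr
-- ===== SOURCE A (Python) =====
-- from operator import index
--
-- def strStr(haystack: str, needle: str) -> int:
--     if len(needle) > len(haystack):
--         return -1
--     if not len(needle):
--         return -1
--     if not len(haystack):
--         return -1
--
--     window = len(needle) - 1
--     index, first, last = 0, 0, len(needle) - 1
--
--     while index + window < len(haystack):
--         first, last = 0, window
--         if needle[first] == haystack[
--                 index + first] and needle[last] == haystack[index + last]:
--             while first <= last:
--                 if needle[first] == haystack[
--                         first + index] and needle[last] == haystack[last +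
--                                                                     index]:
--                     first += 1
--                     last -= 1
--                     if first > last:
--                         return index
--                 else:
--                     break
--         index += 1
--     return -1
-- ===== SOURCE B (Python) =====
-- def strStr(haystack: str, needle: str) -> int:
--     """Rabin-Karp rolling-hash search; same convention as A: -1 for empty needle."""
--     n, m = len(haystack), len(needle)
--     if m == 0 or m > n:
--         return -1
--     MOD = (1 << 61) - 1
--     B = 256
--     target = 0
--     for c in needle:
--         target = (target * B + ord(c)) % MOD
--     h = 0
--     for c in haystack[:m]:
--         h = (h * B + ord(c)) % MOD
--     pw = 1
--     for _ in range(m - 1):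
--         pw = pw * B % MOD
--     for i in range(n - m + 1):
--         if h == target and haystack[i:i + m] == needle:
--             return i
--         if i + m < n:
--             h = ((h - ord(haystack[i]) * pw) * B + ord(haystack[i + m])) % MOD
--     return -1
-- ===== Notes on version B (the rewrite author's own statement) =====
-- stated objective: alternative
-- what changed: Replaced A's sliding-window two-pointer comparison with Rabin-Karp matching: a polynomial rolling hash of each window is updated in O(1) per shift and the full window comparison runs only on a hash match.
import Mathlib
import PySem

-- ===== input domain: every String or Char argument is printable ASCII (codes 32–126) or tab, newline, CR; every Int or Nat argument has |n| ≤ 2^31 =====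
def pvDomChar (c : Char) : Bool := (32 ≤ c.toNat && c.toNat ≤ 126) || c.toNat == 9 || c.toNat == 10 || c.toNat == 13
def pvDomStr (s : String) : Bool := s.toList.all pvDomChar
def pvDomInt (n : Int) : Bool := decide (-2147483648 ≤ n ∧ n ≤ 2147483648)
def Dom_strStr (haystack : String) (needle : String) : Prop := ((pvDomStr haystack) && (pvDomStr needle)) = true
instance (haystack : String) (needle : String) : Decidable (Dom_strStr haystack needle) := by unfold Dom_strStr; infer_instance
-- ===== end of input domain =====

-- B replaces A's sliding-window two-pointer comparison with Rabin-Karp rolling-hash matching (objective: alternative algorithm; equal return value proved, no speed claim).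

-- ===== PORT A =====
-- inner `while first <= last` loop of A; all indices are provably in range at every
-- reachable state (Python never raises here), so plain `getD` is exact.  The `fuel`
-- argument only makes the recursion structural; the supplied fuel is never exhausted.
def strStrInner (hs nd : List Char) (index : Nat) : Nat → Nat → Nat → Bool
  | 0, _, _ => false
  | fuel + 1, first, last =>
    if first ≤ last then
      if nd.getD first ' ' == hs.getD (index + first) ' '
          && nd.getD last ' ' == hs.getD (index + last) ' ' then
        if first + 1 > last - 1 then true
        else strStrInner hs nd index fuel (first + 1) (last - 1)
      else false
    else false

-- outer `while index + window < len(haystack)` loop of A (fuel likewise only for totality)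
def strStrOuter (hs nd : List Char) (window : Nat) : Nat → Nat → Int
  | 0, _ => -1
  | fuel + 1, index =>
    if index + window < hs.length then
      if nd.getD 0 ' ' == hs.getD index ' '
          && nd.getD window ' ' == hs.getD (index + window) ' ' then
        if strStrInner hs nd index (window + 1) 0 window then (index : Int)
        else strStrOuter hs nd window fuel (index + 1)
      else strStrOuter hs nd window fuel (index + 1)
    else -1

def strStr (haystack : String) (needle : String) : Int :=
  let hs := haystack.toList
  let nd := needle.toList
  if nd.length > hs.length then -1
  else if nd.length = 0 then -1
  else if hs.length = 0 then -1
  else strStrOuter hs nd (nd.length - 1) (hs.length + 1) 0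

-- ===== PORT B =====
def pMod : Int := 2 ^ 61 - 1

-- one step of `t = (t * B + ord(c)) % MOD`
def hashStep (t : Int) (c : Char) : Int := PySem.Int.mod (t * 256 + (c.toNat : Int)) pMod

-- the `for i in range(n - m + 1)` loop of B, carrying the rolling hash h
-- (fuel only makes the recursion structural; the supplied fuel is never exhausted)
def strStrLoop (hs nd : List Char) (target pw : Int) : Nat → Nat → Int → Int
  | 0, _, _ => -1
  | fuel + 1, i, h =>
    if i < hs.length - nd.length + 1 then
      if h == target && PySem.List.slice hs (some (i : Int)) (some ((i : Int) + (nd.length : Int))) == nd then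
        (i : Int)
      else
        let h' := if i + nd.length < hs.length then
            PySem.Int.mod ((h - ((hs.getD i ' ').toNat : Int) * pw) * 256
              + ((hs.getD (i + nd.length) ' ').toNat : Int)) pMod
          else h
        strStrLoop hs nd target pw fuel (i + 1) h'
    else -1

def strStr_alt (haystack : String) (needle : String) : Int :=
  let hs := haystack.toList
  let nd := needle.toList
  let n := hs.length
  let m := nd.length
  if m = 0 ∨ m > n then -1
  else
    let target := nd.foldl hashStep 0
    let h0 := (hs.take m).foldl hashStep 0
    let pw := (List.range (m - 1)).foldl (fun a _ => PySem.Int.mod (a * 256) pMod) 1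
    strStrLoop hs nd target pw (hs.length + 1) 0 h0

-- ===== PRECONDITION & SPEC =====
def Spec_strStr (haystack : String) (needle : String) (out : Int) : Prop := out = strStr_alt haystack needle
instance (haystack : String) (needle : String) (out : Int) : Decidable (Spec_strStr haystack needle out) := by unfold Spec_strStr; infer_instance

-- ===== CLAIM (what is proved, stated in full; the proofs are below) =====
def Claim_equal_strStr : Prop := ∀ (haystack : String) (needle : String), Dom_strStr haystack needle → Spec_strStr haystack needle (strStr haystack needle)


-- ===== LEMMAS AND PROOFS =====

-- the plain (un-reduced) polynomial hash of a character list
def polyH (l : List Char) : Int := l.foldl (fun a c => a * 256 + ((c.toNat : Int))) 0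

lemma pMod_pos : (0 : Int) < pMod := by norm_num [pMod]

-- A's haystack slice never matches the needle iff some aligned character differs
def matchAt (hs nd : List Char) (i : Nat) : Prop :=
  ∀ j < nd.length, nd.getD j ' ' = hs.getD (i + j) ' '

lemma foldl_hashStep_bounds (l : List Char) (a : Int) (h0 : 0 ≤ a) (h1 : a < pMod) :
    0 ≤ l.foldl hashStep a ∧ l.foldl hashStep a < pMod := by
  induction l generalizing a with
  | nil => exact ⟨h0, h1⟩
  | cons c t ih =>
    exact ih _ (PySem.Int.mod_nonneg _ pMod_pos) (PySem.Int.mod_lt _ pMod_pos)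

lemma foldl_hashStep_cong (l : List Char) (a b : Int) (hab : a ≡ b [ZMOD pMod]) :
    l.foldl hashStep a ≡ l.foldl (fun x c => x * 256 + ((c.toNat : Int))) b [ZMOD pMod] := by
  induction l generalizing a b with
  | nil => exact hab
  | cons c t ih =>
    refine ih _ _ ?_
    have h1 : hashStep a c ≡ a * 256 + ((c.toNat : Int)) [ZMOD pMod] := by
      rw [hashStep, PySem.Int.mod_eq_emod_of_pos pMod_pos]
      exact Int.emod_emod_of_dvd _ dvd_rfl
    exact h1.trans ((hab.mul_right 256).add_right _)

lemma foldl_poly_shift (l : List Char) (a : Int) :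
    l.foldl (fun x c => x * 256 + ((c.toNat : Int))) a = a * 256 ^ l.length + polyH l := by
  induction l generalizing a with
  | nil => simp [polyH]
  | cons c t ih =>
    show t.foldl _ (a * 256 + _) = _
    rw [ih (a * 256 + ((c.toNat : Int)))]
    have : polyH (c :: t) = ((c.toNat : Int)) * 256 ^ t.length + polyH t := by
      show t.foldl _ (0 * 256 + _) = _
      rw [ih (0 * 256 + ((c.toNat : Int)))]; ring
    rw [this]; simp [List.length_cons]; ring

lemma pw_cong (k : Nat) :
    (List.range k).foldl (fun a _ => PySem.Int.mod (a * 256) pMod) 1 ≡ 256 ^ k [ZMOD pMod] := by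
  induction k with
  | zero => simp
  | succ k ih =>
    rw [List.range_succ, List.foldl_append]
    show PySem.Int.mod ((List.range k).foldl (fun a _ => PySem.Int.mod (a * 256) pMod) 1 * 256) pMod
        ≡ 256 ^ (k + 1) [ZMOD pMod]
    have h1 : PySem.Int.mod ((List.range k).foldl (fun a _ => PySem.Int.mod (a * 256) pMod) 1 * 256) pMod
        ≡ (List.range k).foldl (fun a _ => PySem.Int.mod (a * 256) pMod) 1 * 256 [ZMOD pMod] := by
      rw [PySem.Int.mod_eq_emod_of_pos pMod_pos]
      exact Int.emod_emod_of_dvd _ dvd_rfl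
    rw [pow_succ]
    exact h1.trans (ih.mul_right 256)

-- slice equality ↔ pointwise agreement
lemma match_iff_slice (hs nd : List Char) (i : Nat) (hle : i + nd.length ≤ hs.length) :
    (hs.drop i).take nd.length = nd ↔ matchAt hs nd i := by
  have hlen : ((hs.drop i).take nd.length).length = nd.length := by
    simp; omega
  have hget : ∀ (j : Nat) (hj : j < nd.length),
      ((hs.drop i).take nd.length)[j]'(by omega) = hs[i + j]'(by omega) := by
    intro j hj
    simp [List.getElem_take, List.getElem_drop]
  constructor
  · intro h j hj
    rw [List.getD_eq_getElem nd ' ' hj, List.getD_eq_getElem hs ' ' (by omega),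
      List.getElem_of_eq h.symm hj]
    exact hget j hj
  · intro h
    apply List.ext_getElem hlen
    intro j h1 h2
    rw [hget j h2, ← List.getD_eq_getElem nd ' ' h2, ← List.getD_eq_getElem hs ' ' (by omega)]
    exact (h j h2).symm

-- A's inner two-pointer loop checks exactly the aligned characters at positions first..last
lemma inner_iff (hs nd : List Char) (i : Nat) :
    ∀ (fuel first last : Nat), last - first < fuel → first ≤ last →
      (strStrInner hs nd i fuel first last = true ↔
        ∀ j, first ≤ j → j ≤ last → nd.getD j ' ' = hs.getD (i + j) ' ') := by
  intro fuel
  induction fuel with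
  | zero => intro first last hK; omega
  | succ fuel ih =>
    intro first last hK hfl
    show (if first ≤ last then _ else false) = true ↔ _
    rw [if_pos hfl]
    by_cases hc1 : nd.getD first ' ' = hs.getD (i + first) ' '
    · by_cases hc2 : nd.getD last ' ' = hs.getD (i + last) ' '
      · simp only [hc1, hc2, BEq.rfl, Bool.and_self, if_true]
        by_cases hstop : first + 1 > last - 1
        · -- last ≤ first + 1: both positions already checked
          simp only [hstop, if_pos, true_iff]
          intro j h1 h2
          rcases (by omega : j = first ∨ j = last) with h | h <;> subst h
          · exact hc1
          · exact hc2
        · simp only [hstop, if_false]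
          rw [ih (first + 1) (last - 1) (by omega) (by omega)]
          constructor
          · intro h j h1 h2
            rcases (by omega : j = first ∨ j = last ∨ (first + 1 ≤ j ∧ j ≤ last - 1)) with
              h' | h' | h'
            · subst h'; exact hc1
            · subst h'; exact hc2
            · exact h j h'.1 h'.2
          · intro h j h1 h2
            exact h j (by omega) (by omega)
      · simp only [beq_eq_false_iff_ne.mpr hc2, Bool.and_false, if_false, Bool.false_eq_true,
          false_iff]
        intro h; exact hc2 (h last (by omega) le_rfl)
    · simp only [beq_eq_false_iff_ne.mpr hc1, Bool.false_and, if_false, Bool.false_eq_true,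
        false_iff]
      intro h; exact hc1 (h first le_rfl (by omega))

lemma polyH_cons (c : Char) (t : List Char) :
    polyH (c :: t) = ((c.toNat : Int)) * 256 ^ t.length + polyH t := by
  rw [polyH, List.foldl_cons, foldl_poly_shift]
  rw [polyH]
  ring

lemma polyH_append_singleton (l : List Char) (c : Char) :
    polyH (l ++ [c]) = polyH l * 256 + ((c.toNat : Int)) := by
  simp [polyH, List.foldl_append]

-- the rolling-hash identity, exact over ℤ
lemma poly_roll (hs : List Char) (m i : Nat) (hm : 1 ≤ m) (hlt : i + m < hs.length) :
    polyH ((hs.drop (i + 1)).take m)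
      = (polyH ((hs.drop i).take m) - ((hs.getD i ' ').toNat : Int) * 256 ^ (m - 1)) * 256
        + ((hs.getD (i + m) ' ').toNat : Int) := by
  have hi : i < hs.length := by omega
  have hdl : (hs.drop (i + 1)).length = hs.length - (i + 1) := List.length_drop
  have hm1 : m - 1 < (hs.drop (i + 1)).length := by omega
  have hgd : (hs.drop (i + 1))[m - 1] = hs[i + m]'hlt := by
    rw [List.getElem_drop]
    congr 1
    omega
  have h1 : (hs.drop i).take m = hs[i] :: (hs.drop (i + 1)).take (m - 1) := by
    conv_lhs => rw [List.drop_eq_getElem_cons hi, show m = (m - 1) + 1 by omega]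
    rw [List.take_succ_cons]
  have h2 : (hs.drop (i + 1)).take m = (hs.drop (i + 1)).take (m - 1) ++ [hs[i + m]'hlt] := by
    conv_lhs => rw [show m = (m - 1) + 1 by omega]
    rw [List.take_add_one, List.getElem?_eq_getElem hm1, hgd]
    rfl
  have hlen : ((hs.drop (i + 1)).take (m - 1)).length = m - 1 := by
    simp; omega
  rw [h1, h2, polyH_append_singleton, polyH_cons, hlen,
    List.getD_eq_getElem hs ' ' hi, List.getD_eq_getElem hs ' ' hlt]
  ring

-- main simultaneous loop equivalence: A's window scan and B's rolling-hash scan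
lemma loop_eq (hs nd : List Char) (hm : 1 ≤ nd.length) (hmn : nd.length ≤ hs.length)
    (target pw : Int) (htb : 0 ≤ target) (htb' : target < pMod)
    (htc : target ≡ polyH nd [ZMOD pMod])
    (hpw : pw ≡ 256 ^ (nd.length - 1) [ZMOD pMod]) :
    ∀ (fuel i : Nat) (h : Int), hs.length - nd.length + 1 - i < fuel →
      (i ≤ hs.length - nd.length →
        (0 ≤ h ∧ h < pMod) ∧ h ≡ polyH ((hs.drop i).take nd.length) [ZMOD pMod]) →
      strStrOuter hs nd (nd.length - 1) fuel i = strStrLoop hs nd target pw fuel i h := by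
  intro fuel
  induction fuel with
  | zero => intro i h hK; omega
  | succ fuel ih =>
    intro i h hK hinv
    by_cases hgt : i ≤ hs.length - nd.length
    · obtain ⟨⟨hb0, hb1⟩, hcong⟩ := hinv hgt
      have hiw : i + (nd.length - 1) < hs.length := by omega
      have him : i + nd.length ≤ hs.length := by omega
      have hloopg : i < hs.length - nd.length + 1 := by omega
      have hslice_eq : PySem.List.slice hs (some (i : Int)) (some ((i : Int) + (nd.length : Int)))
          = (hs.drop i).take nd.length := PySem.List.slice_natCast_add hs i nd.length
      show (if i + (nd.length - 1) < hs.length then _ else -1)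
          = (if i < hs.length - nd.length + 1 then _ else -1)
      rw [if_pos hiw, if_pos hloopg]
      by_cases hmatch : matchAt hs nd i
      · -- a genuine occurrence at i: both sides return i
        have hslice : (hs.drop i).take nd.length = nd := (match_iff_slice hs nd i him).mpr hmatch
        have hht : h = target := by
          have h2 : h ≡ target [ZMOD pMod] := hcong.trans (by rw [hslice]; exact htc.symm)
          have h3 : h % pMod = target % pMod := h2
          rwa [Int.emod_eq_of_lt hb0 hb1, Int.emod_eq_of_lt htb htb'] at h3
        have hinner : strStrInner hs nd i (nd.length - 1 + 1) 0 (nd.length - 1) = true :=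
          (inner_iff hs nd i (nd.length - 1 + 1) 0 (nd.length - 1) (by omega) (by omega)).mpr
            (fun j _ h2 => hmatch j (by omega))
        have hg0 : nd.getD 0 ' ' = hs.getD i ' ' := by
          have := hmatch 0 (by omega); rwa [Nat.add_zero] at this
        have hgw : nd.getD (nd.length - 1) ' ' = hs.getD (i + (nd.length - 1)) ' ' :=
          hmatch _ (by omega)
        simp only [hg0, hgw, hht, hslice_eq, hslice, BEq.rfl, Bool.and_self, if_true, hinner]
      · -- no occurrence at i: both sides step to i + 1
        have hslice : ¬ (hs.drop i).take nd.length = nd :=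
          fun hc => hmatch ((match_iff_slice hs nd i him).mp hc)
        have hcondB : (h == target
            && PySem.List.slice hs (some (i : Int)) (some ((i : Int) + (nd.length : Int))) == nd)
            = false := by
          rw [hslice_eq]
          simp [beq_eq_false_iff_ne.mpr hslice]
        -- the candidate next hash value, exactly as in the loop body
        set h' : Int := if i + nd.length < hs.length then
            PySem.Int.mod ((h - ((hs.getD i ' ').toNat : Int) * pw) * 256
              + ((hs.getD (i + nd.length) ' ').toNat : Int)) pMod
          else h with hh'
        have hinv' : i + 1 ≤ hs.length - nd.length →
            (0 ≤ h' ∧ h' < pMod) ∧ h' ≡ polyH ((hs.drop (i + 1)).take nd.length) [ZMOD pMod] := by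
          intro hgt'
          have hlt : i + nd.length < hs.length := by omega
          rw [hh', if_pos hlt]
          refine ⟨⟨PySem.Int.mod_nonneg _ pMod_pos, PySem.Int.mod_lt _ pMod_pos⟩, ?_⟩
          have e1 : PySem.Int.mod ((h - ((hs.getD i ' ').toNat : Int) * pw) * 256
              + ((hs.getD (i + nd.length) ' ').toNat : Int)) pMod
              ≡ (h - ((hs.getD i ' ').toNat : Int) * pw) * 256
                + ((hs.getD (i + nd.length) ' ').toNat : Int) [ZMOD pMod] := by
            rw [PySem.Int.mod_eq_emod_of_pos pMod_pos]
            exact Int.emod_emod_of_dvd _ dvd_rfl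
          have e2 : (h - ((hs.getD i ' ').toNat : Int) * pw) * 256
                + ((hs.getD (i + nd.length) ' ').toNat : Int)
              ≡ (polyH ((hs.drop i).take nd.length)
                  - ((hs.getD i ' ').toNat : Int) * 256 ^ (nd.length - 1)) * 256
                + ((hs.getD (i + nd.length) ' ').toNat : Int) [ZMOD pMod] :=
            (((hcong.sub ((Int.ModEq.refl _).mul hpw)).mul_right 256).add_right _)
          refine (e1.trans e2).trans ?_
          rw [← poly_roll hs nd.length i hm hlt]
        have hstep := ih (i + 1) h' (by omega) hinv'
        rw [hcondB]
        simp only [Bool.false_eq_true, if_false]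
        by_cases hg : (nd.getD 0 ' ' == hs.getD i ' '
            && nd.getD (nd.length - 1) ' ' == hs.getD (i + (nd.length - 1)) ' ') = true
        · rw [hg]
          simp only [if_true]
          have hinner : strStrInner hs nd i (nd.length - 1 + 1) 0 (nd.length - 1) = false := by
            rw [← Bool.not_eq_true]
            intro hc
            apply hmatch
            intro j hj
            exact (inner_iff hs nd i (nd.length - 1 + 1) 0 (nd.length - 1)
              (by omega) (by omega)).mp hc j (by omega) (by omega)
          rw [hinner]
          simpa using hstep
        · rw [Bool.not_eq_true] at hg
          rw [hg]
          simpa using hstep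
    · show (if i + (nd.length - 1) < hs.length then _ else -1)
          = (if i < hs.length - nd.length + 1 then _ else -1)
      rw [if_neg (by omega), if_neg (by omega)]

-- ===== VERDICT (by name: the statement is the Claim_ definition above) =====
theorem strStr_spec : Claim_equal_strStr := by
  intro haystack needle _
  show strStr haystack needle = strStr_alt haystack needle
  simp only [strStr, strStr_alt]
  by_cases h1 : needle.toList.length > haystack.toList.length
  · rw [if_pos h1, if_pos (Or.inr h1)]
  · rw [if_neg h1]
    by_cases h2 : needle.toList.length = 0
    · rw [if_pos h2, if_pos (Or.inl h2)]
    · rw [if_neg h2, if_neg (show ¬haystack.toList.length = 0 by omega),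
        if_neg (show ¬(needle.toList.length = 0 ∨
          needle.toList.length > haystack.toList.length) by omega)]
      have hm : 1 ≤ needle.toList.length := by omega
      have hmn : needle.toList.length ≤ haystack.toList.length := by omega
      have hb := foldl_hashStep_bounds needle.toList 0 le_rfl (by norm_num [pMod])
      have htc : needle.toList.foldl hashStep 0 ≡ polyH needle.toList [ZMOD pMod] :=
        foldl_hashStep_cong needle.toList 0 0 (Int.ModEq.refl 0)
      have hinv0 : 0 ≤ haystack.toList.length - needle.toList.length →
          (0 ≤ (haystack.toList.take needle.toList.length).foldl hashStep 0
            ∧ (haystack.toList.take needle.toList.length).foldl hashStep 0 < pMod)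
          ∧ (haystack.toList.take needle.toList.length).foldl hashStep 0
              ≡ polyH ((haystack.toList.drop 0).take needle.toList.length) [ZMOD pMod] := by
        intro _
        refine ⟨foldl_hashStep_bounds _ 0 le_rfl (by norm_num [pMod]), ?_⟩
        rw [List.drop_zero]
        exact foldl_hashStep_cong _ 0 0 (Int.ModEq.refl 0)
      exact loop_eq haystack.toList needle.toList hm hmn _ _ hb.1 hb.2 htc
        (pw_cong (needle.toList.length - 1))
        (haystack.toList.length + 1) 0 _ (by omega) hinv0
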